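-- pv_equiv track=rewrite | github.com/ROVInfer/usenix26-anon-repo | code/get_BGP_info_from_local.py | CheckLoopBGPRoute
-- ===== SOURCE A (Python) =====
-- def CheckLoopBGPRoute(path): #input path str, output path list
--     path_list = path.split(' ')
--     if any(not elem.isdigit() for elem in path_list): return []
--     res = []
--     for elem in path_list:
--         #if elem not in res: res.append(elem)  #这里原来写的有BUG，应该重写
--         if len(res) > 0 and (elem != res[-1]) and elem in res: return [] #loop
--         res.append(elem)
--     return res
-- ===== SOURCE B (Python) =====
-- def CheckLoopBGPRoute(path):
--     path_list = path.split(' ')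
--     if any(not elem.isdigit() for elem in path_list): return []
--     # phase 1: collapse consecutive duplicate tokens
--     compressed = []
--     prev = None
--     for t in path_list:
--         if t != prev:
--             compressed.append(t)
--             prev = t
--     # phase 2: a non-adjacent repeat exists iff the collapsed list has a duplicate
--     if len(compressed) != len(set(compressed)): return []
--     return path_list
-- ===== Notes on version B (the rewrite author's own statement) =====
-- stated objective: alternative
-- what changed: A detects a loop with a per-element membership test interleaved into the accumulating loop with an early return; B first collapses consecutive duplicate tokens in one pass and then detects a non-adjacent repeat with a single global set-uniqueness test on the collapsed list, returning the original split.
import Mathlib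
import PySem

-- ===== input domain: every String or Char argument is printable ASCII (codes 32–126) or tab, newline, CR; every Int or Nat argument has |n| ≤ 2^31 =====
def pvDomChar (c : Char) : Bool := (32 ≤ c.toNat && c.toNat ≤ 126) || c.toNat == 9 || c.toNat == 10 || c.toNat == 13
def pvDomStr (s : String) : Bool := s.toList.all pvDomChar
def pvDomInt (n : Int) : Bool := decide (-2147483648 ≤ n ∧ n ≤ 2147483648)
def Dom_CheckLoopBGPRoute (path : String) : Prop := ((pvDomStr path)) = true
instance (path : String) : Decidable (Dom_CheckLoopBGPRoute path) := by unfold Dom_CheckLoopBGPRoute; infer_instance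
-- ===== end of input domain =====

-- B replaces A's interleaved per-element membership check with a two-phase pass
-- (collapse consecutive duplicates, then one global set-uniqueness test); objective: alternative decomposition, same cost.

-- ===== PORT A =====
-- A's loop over path_list with accumulator res and early return [] on a detected loop.
def pvALoop (res : List String) (l : List String) : List String :=
  match l with
  | [] => res
  | e :: rest =>
    if 0 < res.length ∧ some e ≠ PySem.List.pyGet? res (-1) ∧ e ∈ res then []
    else pvALoop (res ++ [e]) rest

def CheckLoopBGPRoute (path : String) : List String :=
  let path_list := (PySem.Chars.splitOn path.toList " ".toList).map (fun cs => String.ofList cs)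
  if path_list.any (fun elem => !(PySem.Str.strIsdigit elem)) then []
  else pvALoop [] path_list

-- ===== PORT B =====
def CheckLoopBGPRoute_alt (path : String) : List String :=
  let path_list := (PySem.Chars.splitOn path.toList " ".toList).map (fun cs => String.ofList cs)
  if path_list.any (fun elem => !(PySem.Str.strIsdigit elem)) then []
  else
    -- phase 1: collapse consecutive duplicate tokens (prev starts as None)
    let compressed := (path_list.foldl
        (fun (st : List String × Option String) t =>
          if some t = st.2 then st else (st.1 ++ [t], some t)) ([], none)).1
    -- phase 2: a non-adjacent repeat exists iff the collapsed list has a duplicate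
    if compressed.length ≠ (PySem.Set.ofList compressed).length then []
    else path_list

-- ===== PRECONDITION & SPEC =====
def Spec_CheckLoopBGPRoute (path : String) (out : List String) : Prop := out = CheckLoopBGPRoute_alt path
instance (path : String) (out : List String) : Decidable (Spec_CheckLoopBGPRoute path out) := by unfold Spec_CheckLoopBGPRoute; infer_instance

-- ===== CLAIM (what is proved, stated in full; the proofs are below) =====
def Claim_equal_CheckLoopBGPRoute : Prop := ∀ (path : String), Dom_CheckLoopBGPRoute path → Spec_CheckLoopBGPRoute path (CheckLoopBGPRoute path)

-- ===== LEMMAS AND PROOFS =====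

-- run-length collapse with a "previous token" parameter: the mathematical form of B's phase 1
def pvCol (p : Option String) : List String → List String
  | [] => []
  | x :: xs => if some x = p then pvCol p xs else x :: pvCol (some x) xs

lemma pvFoldl_col (l : List String) : ∀ (acc : List String) (p : Option String),
    (l.foldl (fun (st : List String × Option String) t =>
      if some t = st.2 then st else (st.1 ++ [t], some t)) (acc, p)).1 = acc ++ pvCol p l := by
  induction l with
  | nil => intro acc p; simp [pvCol]
  | cons x xs ih =>
    intro acc p
    by_cases h : some x = p <;> simp [pvCol, h, ih]

lemma pvMem_of_mem_col {y : String} : ∀ (l : List String) (p : Option String), y ∈ pvCol p l → y ∈ l := by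
  intro l
  induction l with
  | nil => intro p h; simp [pvCol] at h
  | cons x xs ih =>
    intro p h
    by_cases hx : some x = p
    · simp [pvCol, hx] at h
      exact List.mem_cons_of_mem _ (ih p h)
    · simp [pvCol, hx] at h
      rcases h with h | h
      · simp [h]
      · exact List.mem_cons_of_mem _ (ih (some x) h)

lemma pvMem_col_none {y : String} : ∀ (l : List String), y ∈ l → y ∈ pvCol none l := by
  have key : ∀ (l : List String) (p : Option String), y ∈ l → y ∈ pvCol p l ∨ some y = p := by
    intro l
    induction l with
    | nil => intro p h; simp at h
    | cons x xs ih =>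
      intro p h
      by_cases hx : some x = p
      · rcases List.mem_cons.mp h with rfl | h
        · right; exact hx
        · simpa [pvCol, hx] using ih p h
      · rcases List.mem_cons.mp h with rfl | h
        · left; simp [pvCol, hx]
        · rcases ih (some x) h with h' | h'
          · left; simp [pvCol, hx, h']
          · left
            have : y = x := Option.some_inj.mp h'
            simp [pvCol, hx, this]
  intro l h
  rcases key l none h with h' | h'
  · exact h'
  · simp at h'

lemma pvLastP_cons (p : Option String) (x : String) (xs : List String) :
    ((x :: xs).getLast?).or p = (xs.getLast?).or (some x) := by
  cases xs with
  | nil => simp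
  | cons y ys =>
    rw [List.getLast?_cons_cons]
    cases h : (y :: ys).getLast? with
    | none => simp at h
    | some a => simp

lemma pvCol_append : ∀ (xs ys : List String) (p : Option String),
    pvCol p (xs ++ ys) = pvCol p xs ++ pvCol ((xs.getLast?).or p) ys := by
  intro xs
  induction xs with
  | nil => intro ys p; simp [pvCol]
  | cons x xs ih =>
    intro ys p
    by_cases hx : some x = p
    · have hl : ((x :: xs).getLast?).or p = (xs.getLast?).or p := by
        rw [pvLastP_cons, hx]
      calc pvCol p (x :: xs ++ ys) = pvCol p (xs ++ ys) := by simp [pvCol, hx]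
        _ = pvCol p xs ++ pvCol ((xs.getLast?).or p) ys := ih ys p
        _ = pvCol p (x :: xs) ++ pvCol (((x :: xs).getLast?).or p) ys := by
            rw [hl]; simp [pvCol, hx]
    · have hl := pvLastP_cons p x xs
      calc pvCol p (x :: xs ++ ys) = x :: pvCol (some x) (xs ++ ys) := by simp [pvCol, hx]
        _ = x :: (pvCol (some x) xs ++ pvCol ((xs.getLast?).or (some x)) ys) := by rw [ih]
        _ = pvCol p (x :: xs) ++ pvCol (((x :: xs).getLast?).or p) ys := by
            rw [hl]; simp [pvCol, hx]

lemma pvPyGetLast (res : List String) (h : res ≠ []) :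
    PySem.List.pyGet? res (-1) = res.getLast? := by
  have hlen : 0 < res.length := List.length_pos_iff.mpr h
  rw [PySem.List.pyGet?, PySem.List.pyIdx?]
  rw [if_neg (by omega), if_pos (by omega : -((res.length : Int)) ≤ -1)]
  simp [List.getLast?_eq_getElem?]

lemma pvMain : ∀ (l acc : List String), (pvCol none acc).Nodup →
    pvALoop acc l = if (pvCol none (acc ++ l)).Nodup then acc ++ l else [] := by
  intro l
  induction l with
  | nil => intro acc h; simp [pvALoop, h]
  | cons e rest ih =>
    intro acc hnd
    by_cases hg : 0 < acc.length ∧ some e ≠ PySem.List.pyGet? acc (-1) ∧ e ∈ acc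
    · -- loop detected: A returns [], and the collapsed full list has a duplicate
      obtain ⟨hlen, hne, hmem⟩ := hg
      have hacc : acc ≠ [] := by intro h; subst h; simp at hlen
      have hne' : some e ≠ acc.getLast? := by rwa [pvPyGetLast acc hacc] at hne
      have hsplit : pvCol none (acc ++ e :: rest)
          = pvCol none acc ++ (e :: pvCol (some e) rest) := by
        rw [pvCol_append]
        simp only [Option.or_none, pvCol]
        rw [if_neg hne']
      have hedup : e ∈ pvCol none acc := pvMem_col_none acc hmem
      have hnodup : ¬ (pvCol none (acc ++ e :: rest)).Nodup := by
        rw [hsplit]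
        intro hn
        rcases List.nodup_append.mp hn with ⟨_, _, hdisj⟩
        exact hdisj e hedup e (by simp) rfl
      rw [pvALoop, if_pos ⟨hlen, hne, hmem⟩, if_neg hnodup]
    · -- no loop yet: step the accumulator
      have hstep : pvALoop acc (e :: rest) = pvALoop (acc ++ [e]) rest := by
        rw [pvALoop, if_neg hg]
      have hnd' : (pvCol none (acc ++ [e])).Nodup := by
        rcases Decidable.not_and_iff_not_or_not.mp hg with h1 | h2
        · have : acc = [] := by
            cases acc with
            | nil => rfl
            | cons a as => exact absurd (by simp) h1
          subst this; simp [pvCol]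
        · rcases Decidable.not_and_iff_not_or_not.mp h2 with h3 | h4
          · -- e equals the last element: it is absorbed by the collapse
            by_cases hacc : acc = []
            · subst hacc; simp [pvCol]
            · have hlast : some e = acc.getLast? := by
                rw [pvPyGetLast acc hacc] at h3
                exact Decidable.not_not.mp h3
              rw [pvCol_append]
              simp only [Option.or_none, pvCol]
              rw [if_pos hlast]
              simpa [pvCol] using hnd
          · -- e not in acc: the collapse appends a fresh element
            have hnm : e ∉ acc := h4
            rw [pvCol_append]
            simp only [Option.or_none]
            have : pvCol (acc.getLast?) [e] = [e] ∨ pvCol (acc.getLast?) [e] = [] := by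
              by_cases h : some e = acc.getLast?
              · right; simp [pvCol, h]
              · left; simp [pvCol, h]
            rcases this with h | h
            · rw [h, List.nodup_append]
              refine ⟨hnd, by simp, ?_⟩
              intro a ha b hb
              simp at hb; subst hb
              intro hab; subst hab
              exact hnm (pvMem_of_mem_col acc none ha)
            · rw [h]; simpa using hnd
      rw [hstep, ih (acc ++ [e]) hnd']
      simp

lemma pvOfList_sublist {α : Type} [BEq α] [LawfulBEq α] : ∀ (xs : List α), (PySem.Set.ofList xs).Sublist xs := by
  intro xs
  induction xs with
  | nil => simp [PySem.Set.ofList_nil]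
  | cons x xs ih =>
    rw [PySem.Set.ofList_cons]
    refine List.Sublist.cons₂ x (List.Sublist.trans ?_ ih)
    simp only [PySem.Set.discard]
    exact List.filter_sublist

lemma pvLenSet_iff {α : Type} [BEq α] [LawfulBEq α] (xs : List α) :
    xs.length = (PySem.Set.ofList xs).length ↔ xs.Nodup := by
  constructor
  · intro h
    have := List.Sublist.eq_of_length (pvOfList_sublist xs) h.symm
    rw [← this]
    exact PySem.Set.nodup_ofList xs
  · intro h
    rw [PySem.Set.ofList_eq_self_of_nodup xs h]

-- ===== VERDICT (by name: the statement is the Claim_ definition above) =====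
theorem CheckLoopBGPRoute_spec : Claim_equal_CheckLoopBGPRoute := by
  intro path _
  unfold Spec_CheckLoopBGPRoute CheckLoopBGPRoute CheckLoopBGPRoute_alt
  dsimp only
  set pl := (PySem.Chars.splitOn path.toList " ".toList).map (fun cs => String.ofList cs) with hpl
  by_cases hd : pl.any (fun elem => !(PySem.Str.strIsdigit elem)) = true
  · rw [if_pos hd, if_pos hd]
  · rw [if_neg hd, if_neg hd]
    rw [pvFoldl_col pl [] none, pvMain pl [] (by simp [pvCol])]
    simp only [List.nil_append]
    by_cases hn : (pvCol none pl).Nodup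
    · rw [if_pos hn, if_neg (Decidable.not_not.mpr ((pvLenSet_iff _).mpr hn))]
    · rw [if_neg hn, if_pos (fun hc => hn ((pvLenSet_iff _).mp hc))]
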